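-- pv_equiv track=rewrite | github.com/fishsauce-05/PythonInPTIT | PY01030.py | solve
-- ===== SOURCE A (Python) =====
-- import math
--
-- def solve(n, k):
-- 	left = 10**(k-1)
-- 	right = 10**k
-- 	nums = []
-- 	for i in range(left, right):
-- 		if math.gcd(n, i) == 1:
-- 			nums.append(i)
-- 	return nums
-- ===== SOURCE B (Python) =====
-- def solve(n, k):
--     left = 10 ** (k - 1)
--     right = 10 ** k
--     m = abs(n)
--     if m == 0:
--         # gcd(0, i) == 1 holds exactly for i == 1
--         return [1] if left <= 1 < right else []
--     # distinct prime factors of m by trial division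
--     primes = []
--     d = 2
--     t = m
--     while d * d <= t:
--         if t % d == 0:
--             primes.append(d)
--             while t % d == 0:
--                 t //= d
--         d += 1
--     if t > 1:
--         primes.append(t)
--     # stream the range in chunks; drop the multiples of each prime factor, one pass per factor
--     out = []
--     start = left
--     while start < right:
--         stop = min(start + 65536, right)
--         chunk = list(range(start, stop))
--         for p in primes:
--             chunk = [i for i in chunk if i % p]
--         out += chunk
--         start = stop
--     return out
-- ===== Notes on version B (the rewrite author's own statement) =====
-- stated objective: alternative
-- what changed: Instead of calling math.gcd(n,i) for every i in the range, B factors |n| once by trial division into its distinct prime factors, handles the gcd edge cases n==0 (only i==1 is coprime) and |n|==1 (no factors, everything kept) through that structure, and streams the range in fixed-size chunks, removing the multiples of each prime factor with one filtering pass per factor.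
import Mathlib
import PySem

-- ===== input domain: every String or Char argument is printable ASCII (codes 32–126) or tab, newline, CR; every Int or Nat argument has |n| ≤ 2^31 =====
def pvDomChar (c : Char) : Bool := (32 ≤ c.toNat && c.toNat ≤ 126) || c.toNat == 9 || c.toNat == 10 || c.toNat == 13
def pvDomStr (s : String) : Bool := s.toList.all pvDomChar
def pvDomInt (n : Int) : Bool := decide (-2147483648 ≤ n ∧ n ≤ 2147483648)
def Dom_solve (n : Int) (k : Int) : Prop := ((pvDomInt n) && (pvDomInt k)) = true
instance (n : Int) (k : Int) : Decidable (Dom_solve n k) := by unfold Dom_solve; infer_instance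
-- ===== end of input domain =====

-- B factors |n| once by trial division and keeps i when no prime factor divides it,
-- instead of A's per-element math.gcd call; alternative algorithm, similar cost.

-- ===== PORT A =====
def solve (n : Int) (k : Int) : List Int :=
  let left : Int := 10 ^ (k - 1).toNat
  let right : Int := 10 ^ k.toNat
  (PySem.List.pyRange left right 1).foldl
    (fun nums i => if Int.gcd n i = 1 then nums ++ [i] else nums) []

-- ===== PORT B =====
-- inner `while t % d == 0: t //= d` of Source B (the guards 2 ≤ d, 0 < t hold at every call site; they only make the recursion total)
def pvStrip (d t : Nat) : Nat :=
  if h : 2 ≤ d ∧ t % d = 0 ∧ 0 < t then pvStrip d (t / d) else t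
  termination_by t
  decreasing_by exact Nat.div_lt_self h.2.2 (by omega)

-- cited by pvFactor's decreasing_by
theorem pvStrip_le (d t : Nat) : pvStrip d t ≤ t := by
  fun_induction pvStrip d t with
  | case1 t h ih => exact le_trans ih (Nat.div_le_self _ _)
  | case2 t h => exact le_refl _


-- outer `while d * d <= t` loop of Source B, accumulating the distinct prime factors found
def pvFactor (d t : Nat) (primes : List Nat) : List Nat × Nat :=
  if h : d * d ≤ t then
    if t % d = 0 then pvFactor (d + 1) (pvStrip d t) (primes ++ [d])
    else pvFactor (d + 1) t primes
  else (primes, t)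
  termination_by t + 2 - d
  decreasing_by
  · have h1 := pvStrip_le d t
    have h2 : d ≤ t := by
      rcases Nat.eq_zero_or_pos d with h0 | h0
      · omega
      · exact le_trans (Nat.le_mul_of_pos_left d h0) h
    omega
  · have h2 : d ≤ t := by
      rcases Nat.eq_zero_or_pos d with h0 | h0
      · omega
      · exact le_trans (Nat.le_mul_of_pos_left d h0) h
    omega


-- chunked `while start < right` loop of Source B: filter one chunk per prime factor, append, advance
def pvChunks (primes : List Nat) (start : Int) (right : Int) (out : List Int) : List Int :=
  if start < right then
    -- stop = min (start + 65536) right; chunk = the per-prime filtering passes over range(start, stop)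
    pvChunks primes (min (start + 65536) right) right
      (out ++ primes.foldl
        (fun (c : List Int) (p : Nat) => c.filter (fun i => i % (p : Int) != 0))
        (PySem.List.pyRange start (min (start + 65536) right) 1))
  else out
  termination_by (right - start).toNat
  decreasing_by omega

def solve_alt (n : Int) (k : Int) : List Int :=
  let left : Int := 10 ^ (k - 1).toNat
  let right : Int := 10 ^ k.toNat
  let m : Nat := n.natAbs
  if m = 0 then (if left ≤ 1 ∧ 1 < right then [1] else [])
  else
    let r := pvFactor 2 m []
    let primes : List Nat := if 1 < r.2 then r.1 ++ [r.2] else r.1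
    pvChunks primes left right []

-- ===== PRECONDITION & SPEC =====
-- A raises TypeError for k ≤ 0 (10**(k-1) is then a float and range() rejects it); excluded.
def Pre_solve (n : Int) (k : Int) : Prop := 1 ≤ k
instance (n : Int) (k : Int) : Decidable (Pre_solve n k) := by unfold Pre_solve; infer_instance
def pvWitness_solve : Int × Int := (12, 1)

def Spec_solve (n : Int) (k : Int) (out : List Int) : Prop := out = solve_alt n k
instance (n : Int) (k : Int) (out : List Int) : Decidable (Spec_solve n k out) := by unfold Spec_solve; infer_instance

-- ===== CLAIM (what is proved, stated in full; the proofs are below) =====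
def Claim_equal_solve : Prop := ∀ (n : Int) (k : Int), Dom_solve n k → Pre_solve n k → Spec_solve n k (solve n k)

-- ===== LEMMAS AND PROOFS =====

theorem pvStrip_spec (d t : Nat) (hd : 2 ≤ d) (ht : 0 < t) :
    0 < pvStrip d t ∧ pvStrip d t ∣ t ∧ ¬ d ∣ pvStrip d t ∧ ∃ e, t = d ^ e * pvStrip d t := by
  fun_induction pvStrip d t with
  | case1 t h ih =>
    have hdvd : d ∣ t := Nat.dvd_iff_mod_eq_zero.mpr h.2.1
    have hpos : 0 < t / d := Nat.div_pos (Nat.le_of_dvd h.2.2 hdvd) (by omega)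
    obtain ⟨p1, p2, p3, e, he⟩ := ih hpos
    refine ⟨p1, p2.trans (Nat.div_dvd_of_dvd hdvd), p3, e + 1, ?_⟩
    have : t = d * (t / d) := (Nat.div_mul_cancel hdvd).symm ▸ (Nat.mul_div_cancel' hdvd).symm
    rw [pow_succ]
    calc t = d * (t / d) := (Nat.mul_div_cancel' hdvd).symm
    _ = d * (d ^ e * pvStrip d (t / d)) := by rw [← he]
    _ = d ^ e * d * pvStrip d (t / d) := by ring
  | case2 t h =>
    push_neg at h
    have := h hd
    refine ⟨ht, dvd_refl t, ?_, 0, by simp⟩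
    intro hdvd
    have := Nat.dvd_iff_mod_eq_zero.mp hdvd
    omega

theorem pvFactor_spec (d t : Nat) (acc : List Nat) (hd : 2 ≤ d) (ht : 0 < t)
    (hinv : ∀ q : Nat, q.Prime → q ∣ t → d ≤ q) :
    ∃ ps, (pvFactor d t acc).1 = acc ++ ps ∧
      0 < (pvFactor d t acc).2 ∧
      ((pvFactor d t acc).2 = 1 ∨ ((pvFactor d t acc).2).Prime) ∧
      (∀ q ∈ ps, q.Prime ∧ q ∣ t) ∧
      ((pvFactor d t acc).2 ∣ t) ∧
      (∀ q : Nat, q.Prime → (q ∣ t ↔ (q ∈ ps ∨ q ∣ (pvFactor d t acc).2))) := by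
  fun_induction pvFactor d t acc with
  | case1 d t acc h hmod ih =>
    -- d divides t; under hinv, d is prime
    have hdvd : d ∣ t := Nat.dvd_iff_mod_eq_zero.mpr hmod
    have hdprime : d.Prime := by
      have h1 : d.minFac.Prime := Nat.minFac_prime (by omega)
      have h2 : d.minFac ∣ t := dvd_trans (Nat.minFac_dvd d) hdvd
      have h3 : d ≤ d.minFac := hinv _ h1 h2
      have h4 : d.minFac ≤ d := Nat.minFac_le (by omega)
      have : d.minFac = d := le_antisymm h4 h3
      rwa [← this]
    obtain ⟨hspos, hsdvd, hsnd, e, he⟩ := pvStrip_spec d t hd ht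
    have he1 : 1 ≤ e := by
      by_contra hc
      have : e = 0 := by omega
      subst this
      simp at he
      exact hsnd (he ▸ hdvd)
    have hinv' : ∀ q : Nat, q.Prime → q ∣ pvStrip d t → d + 1 ≤ q := by
      intro q hq hqd
      have : q ∣ t := hqd.trans hsdvd
      have := hinv q hq this
      rcases Nat.lt_or_ge d q with h' | h'
      · omega
      · have : q = d := le_antisymm h' this
        subst this
        exact absurd hqd hsnd
    obtain ⟨ps, hps, p2, p3, p4, p5, p6⟩ := ih (by omega) hspos hinv'
    refine ⟨d :: ps, by simpa using hps, p2, p3, ?_, p5.trans hsdvd, ?_⟩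
    · intro q hqmem
      rcases List.mem_cons.mp hqmem with rfl | hq
      · exact ⟨hdprime, hdvd⟩
      · obtain ⟨hq1, hq2⟩ := p4 q hq
        exact ⟨hq1, hq2.trans hsdvd⟩
    · intro q hq
      constructor
      · intro hqt
        by_cases hqd : q = d
        · exact Or.inl (by simp [hqd])
        · have : q ∣ d ^ e * pvStrip d t := he ▸ hqt
          rcases (Nat.Prime.dvd_mul hq).mp this with h' | h'
          · have := Nat.Prime.dvd_of_dvd_pow hq h'
            have := (Nat.prime_dvd_prime_iff_eq hq hdprime).mp this
            exact absurd this hqd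
          · rcases (p6 q hq).mp h' with h'' | h''
            · exact Or.inl (List.mem_cons_of_mem _ h'')
            · exact Or.inr h''
      · rintro (hmem | hdvd')
        · rcases List.mem_cons.mp hmem with rfl | hmem
          · exact hdvd
          · exact (p4 q hmem).2.trans hsdvd
        · exact ((p6 q hq).mpr (Or.inr hdvd')).trans hsdvd
  | case2 d t acc h hmod ih =>
    have hnd : ¬ d ∣ t := fun hc => hmod (Nat.dvd_iff_mod_eq_zero.mp hc)
    have hinv' : ∀ q : Nat, q.Prime → q ∣ t → d + 1 ≤ q := by
      intro q hq hqd
      have := hinv q hq hqd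
      rcases Nat.lt_or_ge d q with h' | h'
      · omega
      · have : q = d := le_antisymm h' this
        subst this
        exact absurd hqd hnd
    exact ih (by omega) ht hinv'
  | case3 d t acc h =>
    refine ⟨[], by simp, ht, ?_, by simp, dvd_refl t, by simp⟩
    by_cases ht1 : t = 1
    · exact Or.inl ht1
    right
    -- t has all prime factors ≥ d and t < d*d, so t is prime
    have hp : t.minFac.Prime := Nat.minFac_prime ht1
    have hd1 : d ≤ t.minFac := hinv _ hp (Nat.minFac_dvd t)
    have hc1 : 0 < t / t.minFac := Nat.div_pos (Nat.minFac_le ht) (Nat.minFac_pos t)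
    by_cases hco : t / t.minFac = 1
    · have h4 : t.minFac * (t / t.minFac) = t := Nat.mul_div_cancel' (Nat.minFac_dvd t)
      rw [hco, mul_one] at h4
      exact h4 ▸ hp
    · exfalso
      have hq : (t / t.minFac).minFac.Prime := Nat.minFac_prime hco
      have hqc : (t / t.minFac).minFac ∣ t / t.minFac := Nat.minFac_dvd _
      have hct : t / t.minFac ∣ t := Nat.div_dvd_of_dvd (Nat.minFac_dvd t)
      have h1 : d ≤ (t / t.minFac).minFac := hinv _ hq (hqc.trans hct)
      have h2 : (t / t.minFac).minFac ≤ t / t.minFac := Nat.minFac_le hc1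
      have h3 : d * d ≤ t.minFac * (t / t.minFac) := Nat.mul_le_mul hd1 (le_trans h1 h2)
      have h4 : t.minFac * (t / t.minFac) = t := Nat.mul_div_cancel' (Nat.minFac_dvd t)
      exact h (h4 ▸ h3)

-- the final `primes` list of Source B holds exactly the primes dividing m
theorem pvPrimes_spec (m : Nat) (hm : 0 < m) (q : Nat) :
    q ∈ (if 1 < (pvFactor 2 m []).2 then (pvFactor 2 m []).1 ++ [(pvFactor 2 m []).2]
         else (pvFactor 2 m []).1) ↔ q.Prime ∧ q ∣ m := by
  obtain ⟨ps, hps, p2, p3, p4, p5, p6⟩ :=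
    pvFactor_spec 2 m [] (le_refl 2) hm (fun q hq _ => hq.two_le)
  rw [hps]
  simp only [List.nil_append]
  by_cases h1 : 1 < (pvFactor 2 m []).2
  · rw [if_pos h1]
    constructor
    · intro hmem
      rcases List.mem_append.mp hmem with h | h
      · exact p4 q h
      · have hq : q = (pvFactor 2 m []).2 := by simpa using h
        subst hq
        rcases p3 with h3 | h3
        · omega
        · exact ⟨h3, p5⟩
    · rintro ⟨hq, hqm⟩
      rcases (p6 q hq).mp hqm with h | h
      · exact List.mem_append.mpr (Or.inl h)
      · have ht : ((pvFactor 2 m []).2).Prime := by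
          rcases p3 with h3 | h3
          · omega
          · exact h3
        have : q = (pvFactor 2 m []).2 := (Nat.prime_dvd_prime_iff_eq hq ht).mp h
        exact List.mem_append.mpr (Or.inr (by simp [this]))
  · rw [if_neg h1]
    have ht1 : (pvFactor 2 m []).2 = 1 := by omega
    constructor
    · intro h
      exact p4 q h
    · rintro ⟨hq, hqm⟩
      rcases (p6 q hq).mp hqm with h | h
      · exact h
      · rw [ht1] at h
        have := Nat.dvd_one.mp h
        subst this
        exact absurd hq Nat.not_prime_one

theorem coprime_iff_no_prime_factor (m j : Nat) :
    Nat.gcd m j = 1 ↔ ∀ q : Nat, q.Prime → q ∣ m → ¬ q ∣ j := by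
  constructor
  · intro hg q hq hqm hqj
    have hd : q ∣ Nat.gcd m j := Nat.dvd_gcd hqm hqj
    rw [hg] at hd
    exact hq.one_lt.ne' (Nat.dvd_one.mp hd)
  · intro hall
    by_contra hg
    obtain ⟨p, hp, hpm, hpj⟩ := Nat.Prime.not_coprime_iff_dvd.mp hg
    exact hall p hp hpm hpj

theorem filter_natAbs_one (L R : Int) (hL : 1 ≤ L) :
    (PySem.List.pyRange L R 1).filter (fun i => decide (i.natAbs = 1))
      = if L ≤ 1 ∧ 1 < R then [1] else [] := by
  by_cases h : L ≤ 1 ∧ 1 < R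
  · rw [if_pos h]
    have hL1 : L = 1 := le_antisymm h.1 hL
    subst hL1
    rw [PySem.List.pyRange_one_cons h.2]
    have hnil : (PySem.List.pyRange 2 R 1).filter (fun i => decide (i.natAbs = 1)) = [] := by
      apply List.filter_eq_nil_iff.mpr
      intro a ha
      have hm := (PySem.List.mem_pyRange_one).mp ha
      simp only [decide_eq_true_eq]
      omega
    simp [hnil]
  · rw [if_neg h]
    apply List.filter_eq_nil_iff.mpr
    intro a ha
    have hm := (PySem.List.mem_pyRange_one).mp ha
    simp only [decide_eq_true_eq]
    omega

theorem main_eq (n : Int) (L R : Int) (hL : 1 ≤ L) :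
    (PySem.List.pyRange L R 1).filter (fun i => decide (Int.gcd n i = 1)) =
      if n.natAbs = 0 then (if L ≤ 1 ∧ 1 < R then [1] else [])
      else (PySem.List.pyRange L R 1).filter
        (fun i => (if 1 < (pvFactor 2 n.natAbs []).2
                   then (pvFactor 2 n.natAbs []).1 ++ [(pvFactor 2 n.natAbs []).2]
                   else (pvFactor 2 n.natAbs []).1).all
          (fun p => i % (p : Int) != 0)) := by
  by_cases hm : n.natAbs = 0
  · rw [if_pos hm]
    have hn : n = 0 := Int.natAbs_eq_zero.mp hm
    subst hn
    rw [← filter_natAbs_one L R hL]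
    apply List.filter_congr
    intro i _
    simp [Int.zero_gcd]
  · rw [if_neg hm]
    apply List.filter_congr
    intro i hi
    have hmem := (PySem.List.mem_pyRange_one).mp hi
    have hi1 : 1 ≤ i := le_trans hL hmem.1
    rw [Bool.eq_iff_iff]
    simp only [decide_eq_true_eq, List.all_eq_true, bne_iff_ne, ne_eq]
    rw [Int.gcd_eq_natAbs_gcd_natAbs, coprime_iff_no_prime_factor]
    constructor
    · intro hall p hp hmod
      have hspec := (pvPrimes_spec n.natAbs (Nat.pos_of_ne_zero hm) p).mp hp
      have hdvd : (p : Int) ∣ i := (PySem.Int.emod_eq_zero_iff_dvd i (p : Int)).mp hmod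
      exact hall p hspec.1 hspec.2 (Int.ofNat_dvd_left.mp hdvd)
    · intro hall q hq hqm hqj
      have hqmem := (pvPrimes_spec n.natAbs (Nat.pos_of_ne_zero hm) q).mpr ⟨hq, hqm⟩
      exact hall q hqmem ((PySem.Int.emod_eq_zero_iff_dvd i (q : Int)).mpr (Int.ofNat_dvd_left.mpr hqj))

-- Source B's successive filtering passes compose into one filter by all the prime factors
theorem foldl_filter (ps : List Nat) (l : List Int) :
    ps.foldl (fun (nums : List Int) (p : Nat) => nums.filter (fun i => i % (p : Int) != 0)) l
      = l.filter (fun i => ps.all (fun p => i % (p : Int) != 0)) := by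
  induction ps generalizing l with
  | nil => simp
  | cons p ps ih =>
    rw [List.foldl_cons, ih, List.filter_filter]
    apply List.filter_congr
    intro i _
    simp [List.all_cons, Bool.and_comm]

-- the chunked loop produces the filtered range
theorem pvChunks_eq (primes : List Nat) (start right : Int) (out : List Int) :
    pvChunks primes start right out
      = out ++ (PySem.List.pyRange start right 1).filter
          (fun i => primes.all (fun p => i % (p : Int) != 0)) := by
  rw [pvChunks]
  by_cases h : start < right
  · rw [if_pos h, pvChunks_eq primes (min (start + 65536) right) right _, foldl_filter]
    have h1 : start ≤ min (start + 65536) right := by omega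
    have h2 : min (start + 65536) right ≤ right := by omega
    rw [PySem.List.pyRange_one_append start (min (start + 65536) right) right h1 h2,
      List.filter_append, List.append_assoc]
  · rw [if_neg h, PySem.List.pyRange_one_eq_nil (by omega)]
    simp
  termination_by (right - start).toNat
  decreasing_by omega

-- ===== VERDICT (by name: the statement is the Claim_ definition above) =====
theorem solve_spec : Claim_equal_solve := by
  unfold Claim_equal_solve Spec_solve
  intro n k _ _
  unfold solve solve_alt
  simp only [pvChunks_eq, List.nil_append]
  rw [PySem.List.foldl_append_ite_eq_filter]
  have hL : (1 : Int) ≤ 10 ^ (k - 1).toNat := one_le_pow₀ (by norm_num)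
  simpa using main_eq n (10 ^ (k - 1).toNat) (10 ^ k.toNat) hL
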